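-- pv_equiv track=rewrite | github.com/lesnerd/Python | FindMaxPlusMinusTwins.py | solution
-- ===== SOURCE A (Python) =====
-- def solution(A):
--     dic = dict()
--     biggestNumber = 0
--     for num in A:
--         if num <= 0:
--             if abs(num) in dic:
--                 if biggestNumber < abs(num):
--                     biggestNumber = abs(num)
--                     dic[abs(num)] = 0
--             dic[num] = 1
--         else:
--             if -1 * num in dic:
--                 if biggestNumber < num:
--                     biggestNumber = num
--                     dic[num] = 0
--             dic[num] = 1
--
--     return biggestNumber
-- ===== SOURCE B (Python) =====
-- def solution(A):
--     s = set(A)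
--     return max((abs(x) for x in s if -x in s), default=0)
-- ===== Notes on version B (the rewrite author's own statement) =====
-- stated objective: simpler
-- what changed: Replaces A's interleaved build-and-check dict loop (with conditional value overwrites) by two separate phases: build set(A) once, then take max(abs(x) for x in s if -x in s) with default 0.
import Mathlib
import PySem

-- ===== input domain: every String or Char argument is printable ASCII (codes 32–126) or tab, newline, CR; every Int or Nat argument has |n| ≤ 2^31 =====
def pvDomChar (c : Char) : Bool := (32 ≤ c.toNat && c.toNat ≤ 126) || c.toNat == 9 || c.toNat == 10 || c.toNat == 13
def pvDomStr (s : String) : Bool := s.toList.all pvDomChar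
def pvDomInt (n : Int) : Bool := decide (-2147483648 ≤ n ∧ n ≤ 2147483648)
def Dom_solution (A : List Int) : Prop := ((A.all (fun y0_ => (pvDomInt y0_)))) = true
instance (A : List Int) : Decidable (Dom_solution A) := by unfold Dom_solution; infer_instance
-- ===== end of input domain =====

-- B splits A's interleaved build-and-check dict loop into two phases: build set(A), then a max-scan over it (objective: simpler).


-- ===== PORT A =====
-- one iteration of A's loop body (branches in source order)
def stepA (st : PySem.Dict Int Int × Int) (num : Int) : PySem.Dict Int Int × Int :=
  let dic := st.1
  let big := st.2
  if num ≤ 0 then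
    if dic.contains |num| then
      if big < |num| then ((dic.insert |num| 0).insert num 1, |num|)
      else (dic.insert num 1, big)
    else (dic.insert num 1, big)
  else
    if dic.contains (-1 * num) then
      if big < num then ((dic.insert num 0).insert num 1, num)
      else (dic.insert num 1, big)
    else (dic.insert num 1, big)

def solution (A : List Int) : Int :=
  (A.foldl stepA (PySem.Dict.empty, 0)).2

-- ===== PORT B =====
def solution_alt (A : List Int) : Int :=
  let s : PySem.Set Int := PySem.Set.ofList A
  (PySem.List.max? ((s.filter (fun x => PySem.Set.contains s (-x))).map (fun x => |x|))
    (fun y => y)).getD 0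

-- ===== PRECONDITION & SPEC =====
def Spec_solution (A : List Int) (out : Int) : Prop := out = solution_alt A
instance (A : List Int) (out : Int) : Decidable (Spec_solution A out) := by unfold Spec_solution; infer_instance

-- ===== CLAIM (what is proved, stated in full; the proofs are below) =====
def Claim_equal_solution : Prop := ∀ (A : List Int), Dom_solution A → Spec_solution A (solution A)

-- ===== LEMMAS AND PROOFS =====

-- the three properties that pin down the answer: nonnegative, an upper bound on all
-- matched absolute values, and attained (or 0)
def Props (A : List Int) (r : Int) : Prop :=
  0 ≤ r ∧ (∀ y ∈ A, -y ∈ A → |y| ≤ r) ∧ (r = 0 ∨ ∃ y ∈ A, |y| = r ∧ -y ∈ A)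

lemma props_uniq {A : List Int} {r₁ r₂ : Int} (h₁ : Props A r₁) (h₂ : Props A r₂) :
    r₁ = r₂ := by
  obtain ⟨n₁, u₁, a₁⟩ := h₁
  obtain ⟨n₂, u₂, a₂⟩ := h₂
  apply le_antisymm
  · rcases a₁ with h | ⟨y, hy, hr, hny⟩
    · omega
    · exact hr ▸ u₂ y hy hny
  · rcases a₂ with h | ⟨y, hy, hr, hny⟩
    · omega
    · exact hr ▸ u₁ y hy hny

lemma stepA_snd (dic : PySem.Dict Int Int) (big x : Int) :
    (stepA (dic, big) x).2 = if dic.contains (-x) = true ∧ big < |x| then |x| else big := by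
  unfold stepA
  rcases le_or_gt x 0 with h | h
  · have habs : |x| = -x := abs_of_nonpos h
    simp only [if_pos h, habs]
    split_ifs with h1 h2 h3 <;> simp_all
  · have habs : |x| = x := abs_of_pos h
    have : ¬ x ≤ 0 := by omega
    simp only [if_neg this, habs, neg_one_mul]
    split_ifs with h1 h2 h3 <;> simp_all

lemma stepA_contains (dic : PySem.Dict Int Int) (big x z : Int) :
    (stepA (dic, big) x).1.contains z = true ↔ (z = x ∨ dic.contains z = true) := by
  unfold stepA
  rcases le_or_gt x 0 with h | h
  · have habs : |x| = -x := abs_of_nonpos h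
    simp only [if_pos h]
    split_ifs with h1 h2
    · simp only [PySem.Dict.contains_insert, Bool.or_eq_true, beq_iff_eq]
      constructor
      · rintro (hz | hz | hz)
        · exact Or.inl hz
        · subst hz; exact Or.inr h1
        · exact Or.inr hz
      · tauto
    · simp [PySem.Dict.contains_insert]
    · simp [PySem.Dict.contains_insert]
  · have : ¬ x ≤ 0 := by omega
    simp only [if_neg this]
    split_ifs with h1 h2 <;> simp [PySem.Dict.contains_insert]

-- the fold invariant, generalized over the running dict and maximum
lemma foldA_props : ∀ (l : List Int) (dic : PySem.Dict Int Int) (big : Int), 0 ≤ big →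
    big ≤ (l.foldl stepA (dic, big)).2 ∧
    (∀ y ∈ l, (dic.contains (-y) = true ∨ -y ∈ l) → |y| ≤ (l.foldl stepA (dic, big)).2) ∧
    ((l.foldl stepA (dic, big)).2 = big ∨
      ∃ y ∈ l, |y| = (l.foldl stepA (dic, big)).2 ∧ (dic.contains (-y) = true ∨ -y ∈ l)) := by
  intro l
  induction l with
  | nil => intro dic big h0; simp
  | cons x t ih =>
    intro dic big h0
    have habs : (0:Int) ≤ |x| := abs_nonneg x
    have hsnd := stepA_snd dic big x
    have hcont := stepA_contains dic big x
    have hb1 : big ≤ (stepA (dic, big) x).2 := by rw [hsnd]; split_ifs <;> omega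
    have hb0 : 0 ≤ (stepA (dic, big) x).2 := by rw [hsnd]; split_ifs <;> omega
    obtain ⟨ih1, ih2, ih3⟩ := ih (stepA (dic, big) x).1 (stepA (dic, big) x).2 hb0
    rw [Prod.mk.eta] at ih1 ih2 ih3
    simp only [List.foldl_cons]
    refine ⟨le_trans hb1 ih1, ?_, ?_⟩
    · intro y hy hcond
      rcases List.mem_cons.mp hy with hyx | hyt
      · subst hyx
        rcases hcond with hc | hc
        · -- -y was already a key: the step raises big to at least |y|
          have hx2 : |y| ≤ (stepA (dic, big) y).2 := by
            rw [hsnd]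
            by_cases hlt : big < |y|
            · rw [if_pos ⟨hc, hlt⟩]
            · rw [if_neg (by tauto)]; omega
          exact le_trans hx2 ih1
        · rcases List.mem_cons.mp hc with hx0 | hxt
          · -- -y = y, so y = 0
            have hx0' : y = 0 := by omega
            subst hx0'
            simpa using le_trans h0 (le_trans hb1 ih1)
          · -- -y occurs later in t; apply IH to element -y, whose negation y is now a key
            have := ih2 (-y) hxt (Or.inl ((hcont (-(-y))).mpr (Or.inl (neg_neg y))))
            rwa [abs_neg] at this
      · apply ih2 y hyt
        rcases hcond with hc | hc
        · exact Or.inl ((hcont (-y)).mpr (Or.inr hc))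
        · rcases List.mem_cons.mp hc with hyx | hyt'
          · exact Or.inl ((hcont (-y)).mpr (Or.inl hyx))
          · exact Or.inr hyt'
    · rcases ih3 with hend | ⟨y, hyt, hyr, hycond⟩
      · -- the tail never changed big: either the step changed it (witness x) or nothing did
        rw [hend, hsnd]
        split_ifs with h
        · exact Or.inr ⟨x, List.mem_cons_self, rfl, Or.inl h.1⟩
        · exact Or.inl rfl
      · refine Or.inr ⟨y, List.mem_cons_of_mem _ hyt, hyr, ?_⟩
        rcases hycond with hc | hc
        · rcases (hcont (-y)).mp hc with h | h
          · exact Or.inr (h ▸ List.mem_cons_self)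
          · exact Or.inl h
        · exact Or.inr (List.mem_cons_of_mem _ hc)

-- max(list, default=0) as a fold target: it is 0 or a member, and bounds every member
lemma getDmax_props (l : List Int) :
    ((PySem.List.max? l (fun y => y)).getD 0 = 0 ∨ (PySem.List.max? l (fun y => y)).getD 0 ∈ l) ∧
    (∀ a ∈ l, a ≤ (PySem.List.max? l (fun y => y)).getD 0) := by
  cases hm : PySem.List.max? l (fun y => y) with
  | none =>
    refine ⟨Or.inl rfl, ?_⟩
    intro a ha
    rw [PySem.List.max?_eq_none_iff] at hm
    subst hm; simp at ha
  | some m =>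
    exact ⟨Or.inr (by simpa using PySem.List.max?_mem hm),
      fun a ha => by simpa using PySem.List.max?_isMax hm a ha⟩

lemma solution_props (A : List Int) : Props A (solution A) := by
  obtain ⟨h1, h2, h3⟩ := foldA_props A PySem.Dict.empty 0 le_rfl
  refine ⟨h1, ?_, ?_⟩
  · intro y hy hny
    exact h2 y hy (Or.inr hny)
  · rcases h3 with h | ⟨y, hy, hyr, hc | hc⟩
    · exact Or.inl h
    · simp [PySem.Dict.contains_empty] at hc
    · exact Or.inr ⟨y, hy, hyr, hc⟩

lemma solution_alt_props (A : List Int) : Props A (solution_alt A) := by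
  have hrfl : solution_alt A =
      (PySem.List.max? (((PySem.Set.ofList A).filter
          (fun x => PySem.Set.contains (PySem.Set.ofList A) (-x))).map (fun x => |x|))
        (fun y => y)).getD 0 := rfl
  obtain ⟨hattain, hub⟩ := getDmax_props (((PySem.Set.ofList A).filter
      (fun x => PySem.Set.contains (PySem.Set.ofList A) (-x))).map (fun x => |x|))
  rw [hrfl]
  refine ⟨?_, ?_, ?_⟩
  · rcases hattain with h | h
    · omega
    · obtain ⟨x, _, hx⟩ := List.mem_map.mp h
      rw [← hx]; exact abs_nonneg x
  · intro y hy hny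
    apply hub
    refine List.mem_map.mpr ⟨y, List.mem_filter.mpr ⟨?_, ?_⟩, rfl⟩
    · exact (PySem.Set.mem_ofList A y).mpr hy
    · exact (PySem.Set.contains_iff _ _).mpr ((PySem.Set.mem_ofList A (-y)).mpr hny)
  · rcases hattain with h | h
    · exact Or.inl h
    · obtain ⟨x, hxf, hx⟩ := List.mem_map.mp h
      obtain ⟨hxs, hxc⟩ := List.mem_filter.mp hxf
      refine Or.inr ⟨x, (PySem.Set.mem_ofList A x).mp hxs, hx, ?_⟩
      exact (PySem.Set.mem_ofList A (-x)).mp ((PySem.Set.contains_iff _ _).mp hxc)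

-- ===== VERDICT (by name: the statement is the Claim_ definition above) =====
theorem solution_spec : Claim_equal_solution := by
  intro A _
  exact props_uniq (solution_props A) (solution_alt_props A)
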